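-- pv_equiv track=rewrite | github.com/vsudele15/cis6930sp24-assignment0 | assignment0/main.py | process_middle_components
-- ===== SOURCE A (Python) =====
-- def is_location_component(component):
--     return (
--             component not in ["MVA", "COP", "EMS", "RAMPMVA"] and
--             (component.isdecimal() or component.isupper() or component == "/" or ';' in component or component == '1/2')
--     )
--
-- def process_middle_components(middle):
--     loc, nat = [], []
--     for rec in middle:
--         if len(nat) == 0 and is_location_component(rec):
--             loc.append(rec)
--         elif rec in ['HWYMotorist', 'RAMPMotorist']:
--             loc.append(rec.split('Motorist')[0])
--             nat.append('Motorist')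
--         elif rec == "RAMPMVA":
--             loc.append('RAMP')
--             nat.insert(0, 'MVA')
--         else:
--             nat.append(rec)
--     return loc, nat
-- ===== SOURCE B (Python) =====
-- def is_location_component(component):
--     return (
--             component not in ["MVA", "COP", "EMS", "RAMPMVA"] and
--             (component.isdecimal() or component.isupper() or component == "/" or ';' in component or component == '1/2')
--     )
--
-- def process_middle_components(middle):
--     # Split point: index of the first record that is not a location component
--     # (that is exactly where A's nat list first becomes non-empty).
--     k = next((i for i, rec in enumerate(middle) if not is_location_component(rec)),
--              len(middle))
--     rest = middle[k:]
--     motorist = {'HWYMotorist': 'HWY', 'RAMPMotorist': 'RAMP'}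
--     # loc: the leading location run, plus one prefix per special record in the rest.
--     loc = middle[:k] + [motorist.get(rec, 'RAMP') for rec in rest
--                         if rec in motorist or rec == 'RAMPMVA']
--     # nat: every RAMPMVA contributes an 'MVA' inserted at the front; since all such
--     # insertions carry the identical string, the result is count copies of 'MVA'
--     # followed by the remaining records (Motorist specials renamed) in order.
--     nat = ['MVA'] * rest.count('RAMPMVA') + \
--           ['Motorist' if rec in motorist else rec for rec in rest if rec != 'RAMPMVA']
--     return loc, nat
-- ===== Notes on version B (the rewrite author's own statement) =====
-- stated objective: alternative
-- what changed: Replaces A's single stateful loop co-evolving two accumulators (with insert(0,'MVA')) by a declarative construction: compute the split index of the leading location run, then build loc and nat independently from the remainder with filter/map comprehensions, turning the front insertions into a count of 'RAMPMVA' (correct because all inserted values are the identical string 'MVA').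
import Mathlib
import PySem

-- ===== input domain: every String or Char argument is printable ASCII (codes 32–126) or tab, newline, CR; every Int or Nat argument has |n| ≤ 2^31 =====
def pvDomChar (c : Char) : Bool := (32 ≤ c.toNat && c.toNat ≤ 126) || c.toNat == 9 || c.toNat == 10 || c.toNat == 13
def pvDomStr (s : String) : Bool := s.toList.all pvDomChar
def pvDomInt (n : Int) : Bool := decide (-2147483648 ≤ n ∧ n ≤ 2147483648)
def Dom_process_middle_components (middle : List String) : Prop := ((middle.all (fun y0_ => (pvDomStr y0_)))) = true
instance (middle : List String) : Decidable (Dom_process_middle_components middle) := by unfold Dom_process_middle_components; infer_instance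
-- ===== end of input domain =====

-- B replaces A's stateful accumulator loop by a declarative construction: it finds
-- the split index of the leading location run and then builds loc and nat
-- independently from the remainder via filter/map and a count of 'RAMPMVA'.
-- Equivalence of the return values is proved on the full domain.

-- ===== PORT A =====

-- s.isupper(): hand port, exact on ASCII — at least one cased (= alphabetic) char and no lowercase char.
def pyIsupper (s : String) : Bool :=
  s.toList.any PySem.Chars.isalpha && s.toList.all (fun c => !PySem.Chars.islower c)

-- s.isdecimal(): on the ASCII domain this coincides with s.isdigit() = PySem.Str.strIsdigit.
def is_location_component (component : String) : Bool :=
  !(component == "MVA" || component == "COP" || component == "EMS" || component == "RAMPMVA") &&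
  (PySem.Str.strIsdigit component || pyIsupper component || component == "/" ||
   PySem.Str.isIn ";" component || component == "1/2")

def pmcLoopA : List String → List String → List String → List String × List String
  | [], loc, nat => (loc, nat)
  | rec :: rest, loc, nat =>
    if nat.length == 0 && is_location_component rec then
      pmcLoopA rest (loc ++ [rec]) nat
    else if rec == "HWYMotorist" || rec == "RAMPMotorist" then
      pmcLoopA rest (loc ++ [((PySem.Str.split? rec "Motorist").getD []).headD ""]) (nat ++ ["Motorist"])
    else if rec == "RAMPMVA" then
      pmcLoopA rest (loc ++ ["RAMP"]) (PySem.List.insert nat 0 "MVA")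
    else
      pmcLoopA rest loc (nat ++ [rec])

def process_middle_components (middle : List String) : List String × List String :=
  pmcLoopA middle [] []

-- ===== PORT B =====

-- k = next((i for i, rec in enumerate(middle) if not is_location_component(rec)), len(middle))
def pmcK : List String → Nat
  | [] => 0
  | rec :: rest => if !is_location_component rec then 0 else pmcK rest + 1

-- [motorist.get(rec, 'RAMP') for rec in rest if rec in motorist or rec == 'RAMPMVA']
-- (motorist = {'HWYMotorist': 'HWY', 'RAMPMotorist': 'RAMP'}; the .get with default 'RAMP' is the if-chain)
def pmcLocExtra (rest : List String) : List String :=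
  (rest.filter (fun r => r == "HWYMotorist" || r == "RAMPMotorist" || r == "RAMPMVA")).map
    (fun r => if r == "HWYMotorist" then "HWY" else "RAMP")

-- ['Motorist' if rec in motorist else rec for rec in rest if rec != 'RAMPMVA']
def pmcNatExtra (rest : List String) : List String :=
  (rest.filter (fun r => !(r == "RAMPMVA"))).map
    (fun r => if r == "HWYMotorist" || r == "RAMPMotorist" then "Motorist" else r)

def process_middle_components_alt (middle : List String) : List String × List String :=
  let k := pmcK middle
  let rest := middle.drop k          -- middle[k:] with 0 ≤ k: exact
  (middle.take k ++ pmcLocExtra rest,  -- middle[:k] + comprehension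
   List.replicate (PySem.List.count rest "RAMPMVA") "MVA" ++ pmcNatExtra rest)  -- ['MVA']*count + comprehension

-- ===== PRECONDITION & SPEC =====
def Spec_process_middle_components (middle : List String) (out : List String × List String) : Prop := out = process_middle_components_alt middle
instance (middle : List String) (out : List String × List String) : Decidable (Spec_process_middle_components middle out) := by unfold Spec_process_middle_components; infer_instance

-- ===== CLAIM =====
def Claim_equal_process_middle_components : Prop := ∀ (middle : List String), Dom_process_middle_components middle → Spec_process_middle_components middle (process_middle_components middle)

-- ===== LEMMAS AND PROOFS =====

theorem split_HWY : PySem.Str.split? "HWYMotorist" "Motorist" = some ["HWY", ""] := by decide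
theorem split_RAMP : PySem.Str.split? "RAMPMotorist" "Motorist" = some ["RAMP", ""] := by decide

-- Closed form of A's loop once nat is of shape 'm copies of MVA before s' (nonempty).
theorem loopA_closed_rest (rest : List String) : ∀ loc (m : Nat) (s : List String),
    m + s.length ≠ 0 →
    pmcLoopA rest loc (List.replicate m "MVA" ++ s) =
      (loc ++ pmcLocExtra rest,
       List.replicate (m + PySem.List.count rest "RAMPMVA") "MVA" ++ s ++ pmcNatExtra rest) := by
  induction rest with
  | nil =>
    intro loc m s _
    simp [pmcLoopA, pmcLocExtra, pmcNatExtra, PySem.List.count]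
  | cons rec rest ih =>
    intro loc m s hne
    have hc : ¬(m = 0 ∧ s = []) := by rintro ⟨rfl, rfl⟩; simp at hne
    by_cases h1 : rec = "HWYMotorist"
    · subst h1
      have := ih (loc ++ ["HWY"]) m (s ++ ["Motorist"]) (by simp)
      simp [pmcLoopA, hc, split_HWY, pmcLocExtra, pmcNatExtra, PySem.List.count] at this ⊢
      simpa using this
    · by_cases h2 : rec = "RAMPMotorist"
      · subst h2
        have := ih (loc ++ ["RAMP"]) m (s ++ ["Motorist"]) (by simp)
        simp [pmcLoopA, hc, split_RAMP, pmcLocExtra, pmcNatExtra, PySem.List.count] at this ⊢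
        simpa using this
      · by_cases h3 : rec = "RAMPMVA"
        · subst h3
          have := ih (loc ++ ["RAMP"]) (m + 1) s (by omega)
          simp [pmcLoopA, hc, PySem.List.insert_zero, pmcLocExtra, pmcNatExtra,
                PySem.List.count, List.replicate_succ] at this ⊢
          simpa [List.replicate_succ, Nat.add_assoc, Nat.add_comm, Nat.add_left_comm] using this
        · have := ih loc m (s ++ [rec]) (by simp)
          simp [pmcLoopA, hc, h1, h2, h3, pmcLocExtra, pmcNatExtra, PySem.List.count] at this ⊢
          simpa [h1, h2, h3] using this

-- Closed form of A's loop from an empty nat: the leading location run goes to loc.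
theorem loopA_closed (middle : List String) : ∀ loc,
    pmcLoopA middle loc [] =
      (loc ++ middle.take (pmcK middle) ++ pmcLocExtra (middle.drop (pmcK middle)),
       List.replicate (PySem.List.count (middle.drop (pmcK middle)) "RAMPMVA") "MVA" ++
         pmcNatExtra (middle.drop (pmcK middle))) := by
  induction middle with
  | nil => intro loc; simp [pmcLoopA, pmcK, pmcLocExtra, pmcNatExtra, PySem.List.count]
  | cons rec rest ih =>
    intro loc
    by_cases hl : is_location_component rec = true
    · simp [pmcLoopA, pmcK, hl, ih (loc ++ [rec])]
    · have hk : pmcK (rec :: rest) = 0 := by simp [pmcK, hl]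
      rw [hk]
      simp only [List.take_zero, List.drop_zero, List.append_nil]
      by_cases h1 : rec = "HWYMotorist"
      · subst h1
        have := loopA_closed_rest rest (loc ++ ["HWY"]) 0 ["Motorist"] (by simp)
        simp [pmcLoopA, hl, split_HWY, pmcLocExtra, pmcNatExtra, PySem.List.count] at this ⊢
        simpa using this
      · by_cases h2 : rec = "RAMPMotorist"
        · subst h2
          have := loopA_closed_rest rest (loc ++ ["RAMP"]) 0 ["Motorist"] (by simp)
          simp [pmcLoopA, hl, split_RAMP, pmcLocExtra, pmcNatExtra, PySem.List.count] at this ⊢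
          simpa using this
        · by_cases h3 : rec = "RAMPMVA"
          · subst h3
            have := loopA_closed_rest rest (loc ++ ["RAMP"]) 1 [] (by simp)
            simp [pmcLoopA, hl, PySem.List.insert_zero, pmcLocExtra, pmcNatExtra,
                  PySem.List.count, List.replicate_succ] at this ⊢
            simpa [List.replicate_succ, Nat.add_comm] using this
          · have := loopA_closed_rest rest loc 0 [rec] (by simp)
            simp [pmcLoopA, hl, h1, h2, h3, pmcLocExtra, pmcNatExtra, PySem.List.count] at this ⊢
            simpa [h1, h2, h3] using this

-- ===== VERDICT =====
theorem process_middle_components_spec : Claim_equal_process_middle_components := by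
  intro middle _
  unfold Spec_process_middle_components process_middle_components process_middle_components_alt
  simpa using loopA_closed middle []
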